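-- pv_equiv track=rewrite | github.com/reshusai/python_course | unit6_assignment_03.py | lent
-- ===== SOURCE A (Python) =====
-- def lent(r):
--     result = []
--     for i in r:
--         re = sorted(i, key=lambda j: (j.lower()))
--         result.append(re)
--     result.sort(key=lambda i: i[0].lower())
--     p = sorted(result,key=len, reverse = True)
--     return p
-- ===== SOURCE B (Python) =====
-- def lent(r):
--     result = sorted((sorted(i, key=lambda j: j.lower()) for i in r),
--                     key=lambda i: i[0].lower())
--     out = []
--     for n in sorted({len(l) for l in result}, reverse=True):
--         out += [l for l in result if len(l) == n]
--     return out
-- ===== Notes on version B (the rewrite author's own statement) =====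
-- stated objective: alternative
-- what changed: The final stable sort by length (reverse=True) is replaced by an index table: the distinct lengths are collected into a set, iterated in descending order, and each length's bucket (a filter of the first-char-sorted list) is concatenated to form the output.
import Mathlib
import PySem

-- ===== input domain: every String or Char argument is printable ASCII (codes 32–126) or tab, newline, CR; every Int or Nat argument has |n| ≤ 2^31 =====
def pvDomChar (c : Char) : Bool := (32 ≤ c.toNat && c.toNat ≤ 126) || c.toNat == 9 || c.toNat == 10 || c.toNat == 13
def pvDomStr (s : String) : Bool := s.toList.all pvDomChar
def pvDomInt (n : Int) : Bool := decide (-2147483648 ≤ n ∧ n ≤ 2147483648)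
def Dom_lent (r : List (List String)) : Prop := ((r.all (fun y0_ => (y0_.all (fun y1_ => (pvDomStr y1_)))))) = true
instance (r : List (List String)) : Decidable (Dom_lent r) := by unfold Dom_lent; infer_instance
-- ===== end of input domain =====

-- B replaces A's final stable sort by length (reverse=True) with an index table: the
-- distinct lengths, taken in descending order, each contribute their bucket (a filter of
-- the first-char-sorted list) to the output; objective: alternative decomposition.

-- ===== PORT A =====
-- result.sort(...) mutates a local list only; i[0] is ported as pyGetD i 0 "" — exact
-- because Pre_ excludes the empty inner lists on which Python's i[0] raises IndexError.
def lent (r : List (List String)) : List (List String) :=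
  let result := r.foldl (fun acc i => acc ++ [PySem.List.sorted i (fun j => PySem.Str.lower j)]) []
  let result2 := PySem.List.sorted result (fun i => PySem.Str.lower (PySem.List.pyGetD i 0 ""))
  PySem.List.sorted result2 (fun i => (i.length : Int)) true

-- ===== PORT B =====
def lent_alt (r : List (List String)) : List (List String) :=
  let result := PySem.List.sorted (r.map (fun i => PySem.List.sorted i (fun j => PySem.Str.lower j)))
                  (fun i => PySem.Str.lower (PySem.List.pyGetD i 0 ""))
  let lens : PySem.Set Int := PySem.Set.ofList (result.map (fun l => (l.length : Int)))
  (PySem.List.sorted lens (fun x => x) true).foldl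
    (fun out n => out ++ result.filter (fun l => (l.length : Int) == n)) []

-- ===== PRECONDITION & SPEC =====
-- Pre_ excludes exactly the inputs containing an empty inner list, on which A's sort key
-- i[0].lower() raises IndexError (B raises there too).
def Pre_lent (r : List (List String)) : Prop := ∀ i ∈ r, i ≠ []
instance (r : List (List String)) : Decidable (Pre_lent r) := by unfold Pre_lent; infer_instance
def pvWitness_lent : List (List String) := [["b", "A"], ["c"], ["a", "x", "y"]]

def Spec_lent (r : List (List String)) (out : List (List String)) : Prop := out = lent_alt r
instance (r : List (List String)) (out : List (List String)) : Decidable (Spec_lent r out) := by unfold Spec_lent; infer_instance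

-- ===== CLAIM (what is proved, stated in full; the proofs are below) =====
def Claim_equal_lent : Prop := ∀ (r : List (List String)), Dom_lent r → Pre_lent r → Spec_lent r (lent r)

-- ===== LEMMAS AND PROOFS =====

-- insertBy prepends when every element of the list is "after" x.
theorem insertBy_of_forall_true {α : Type} (bef : α → α → Bool) (x : α) (L : List α)
    (h : ∀ y ∈ L, bef x y = true) : PySem.List.insertBy bef x L = x :: L := by
  cases L with
  | nil => rfl
  | cons y t => simp [PySem.List.insertBy, h y (by simp)]

-- insertBy skips a prefix none of whose elements is "after" x.
theorem insertBy_append_of_forall_false {α : Type} (bef : α → α → Bool) (x : α) (A B : List α)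
    (h : ∀ y ∈ A, bef x y = false) :
    PySem.List.insertBy bef x (A ++ B) = A ++ PySem.List.insertBy bef x B := by
  induction A with
  | nil => rfl
  | cons a t ih =>
      simp only [List.cons_append, PySem.List.insertBy, h a (by simp)]
      simp only [Bool.false_eq_true, if_false, List.cons.injEq, true_and]
      exact ih (fun y hy => h y (by simp [hy]))

-- Inserting x into the bucket concatenation when its key already heads a bucket:
-- x lands at the end of its own bucket.
theorem step_mem {α : Type} (key : α → Int) (x : α) (g : Int → List α)
    (hg : ∀ n, ∀ y ∈ g n, key y = n) :
    ∀ D : List Int, D.Pairwise (· > ·) → key x ∈ D →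
    PySem.List.insertBy (fun a b => decide (key b < key a)) x (D.flatMap g)
      = D.flatMap (fun n => if n = key x then g n ++ [x] else g n) := by
  intro D
  induction D with
  | nil => intro _ h; exact absurd h (by simp)
  | cons n t ih =>
      intro hp hmem
      have hgt : ∀ m ∈ t, m < n := by
        intro m hm; exact (List.pairwise_cons.mp hp).1 m hm
      have hpt : t.Pairwise (· > ·) := (List.pairwise_cons.mp hp).2
      simp only [List.flatMap_cons]
      by_cases hk : n = key x
      · -- x's bucket is the head bucket
        have hnt : key x ∉ t := by intro h; have := hgt _ h; omega
        rw [insertBy_append_of_forall_false _ _ (g n) _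
            (fun y hy => by simp [hg n y hy, hk])]
        rw [insertBy_of_forall_true _ _ _
            (fun y hy => by
              obtain ⟨m, hm, hym⟩ := List.mem_flatMap.mp hy
              simp [hg m y hym, ← hk]; exact hgt m hm)]
        rw [if_pos hk, List.flatMap_congr (fun m hm => if_neg (by
              intro h; exact hnt (by rw [← h]; exact hm)))]
        simp
      · have hmt : key x ∈ t := by
          rcases List.mem_cons.mp hmem with h | h
          · exact absurd h.symm hk
          · exact h
        have hlt : key x < n := hgt _ hmt
        rw [insertBy_append_of_forall_false _ _ (g n) _
            (fun y hy => by simp [hg n y hy]; omega)]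
        rw [ih hpt hmt, if_neg hk]
  
-- Inserting x whose key is new: the key is inserted into the descending key list and
-- x forms its own singleton bucket.
theorem step_new {α : Type} (key : α → Int) (x : α) (g : Int → List α)
    (hg : ∀ n, ∀ y ∈ g n, key y = n) :
    ∀ D : List Int, D.Pairwise (· > ·) → key x ∉ D →
    PySem.List.insertBy (fun a b => decide (key b < key a)) x (D.flatMap g)
      = (PySem.List.insertBy (fun a b : Int => decide (b < a)) (key x) D).flatMap
          (fun n => if n = key x then [x] else g n) := by
  intro D
  induction D with
  | nil => simp [PySem.List.insertBy]
  | cons n t ih =>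
      intro hp hmem
      have hk : key x ≠ n := fun h => hmem (by simp [h])
      have hgt : ∀ m ∈ t, m < n := by
        intro m hm; exact (List.pairwise_cons.mp hp).1 m hm
      have hpt : t.Pairwise (· > ·) := (List.pairwise_cons.mp hp).2
      by_cases hlt : n < key x
      · -- x goes in front of everything
        have : PySem.List.insertBy (fun a b : Int => decide (b < a)) (key x) (n :: t)
            = key x :: n :: t := by simp [PySem.List.insertBy, hlt]
        rw [this]
        rw [insertBy_of_forall_true _ _ _
            (fun y hy => by
              obtain ⟨m, hm, hym⟩ := List.mem_flatMap.mp hy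
              have : m ≤ n := by
                rcases List.mem_cons.mp hm with h | h
                · omega
                · have := hgt _ h; omega
              simp [hg m y hym]; omega)]
        have hcong : (n :: t).flatMap (fun m => if m = key x then [x] else g m)
            = (n :: t).flatMap g :=
          List.flatMap_congr (fun m hm => if_neg (fun h => hmem (by rw [← h]; exact hm)))
        rw [show List.flatMap (fun n => if n = key x then [x] else g n) (key x :: n :: t)
              = [x] ++ List.flatMap g (n :: t) from by rw [List.flatMap_cons, hcong]; simp]
        rfl
      · have hlt' : key x < n := by omega
        have : PySem.List.insertBy (fun a b : Int => decide (b < a)) (key x) (n :: t)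
            = n :: PySem.List.insertBy (fun a b : Int => decide (b < a)) (key x) t := by
          simp [PySem.List.insertBy]; omega
        rw [this]
        simp only [List.flatMap_cons]
        rw [insertBy_append_of_forall_false _ _ (g n) _
            (fun y hy => by simp [hg n y hy]; omega)]
        rw [ih hpt (fun h => hmem (by simp [h])), if_neg (Ne.symm hk)]

-- Main characterisation: Python's stable sort by an Int key, descending, is the
-- concatenation of the key buckets taken over the distinct keys in descending order.
theorem bucket_sorted {α : Type} (key : α → Int) (ws : List α) :
    PySem.List.sorted ws key true
      = (PySem.List.sorted (PySem.Set.ofList (ws.map key)) (fun x => x) true).flatMap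
          (fun n => ws.filter (fun y => key y == n)) := by
  induction ws using List.reverseRecOn with
  | nil => rfl
  | append_singleton ws x ih =>
      have hg : ∀ (zs : List α) (n : Int), ∀ y ∈ zs.filter (fun y => key y == n), key y = n := by
        intro zs n y hy
        have := (List.mem_filter.mp hy).2
        simpa using this
      -- LHS: one more insertBy step
      rw [PySem.List.sorted_rev_eq_foldl_insertBy, List.foldl_append,
          ← PySem.List.sorted_rev_eq_foldl_insertBy, ih]
      simp only [List.foldl_cons, List.foldl_nil]
      set S : PySem.Set Int := PySem.Set.ofList (ws.map key) with hS
      set D : List Int := PySem.List.sorted S (fun x => x) true with hD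
      have hDperm : D.Perm S := PySem.List.sorted_perm _ _ _
      have hDpair : D.Pairwise (· > ·) := by
        have h1 : D.Pairwise (fun a b : Int => b ≤ a) := PySem.List.sorted_pairwise_rev S (fun x => x)
        have h2 : D.Nodup := hDperm.nodup_iff.mpr (PySem.Set.nodup_ofList _)
        exact (List.pairwise_and_iff.mpr ⟨h1, h2⟩).imp (by intro a b ⟨hle, hne⟩; omega)
      have hmemD : ∀ m : Int, m ∈ D ↔ m ∈ ws.map key := by
        intro m
        rw [hDperm.mem_iff, hS, PySem.Set.mem_ofList]
      -- RHS set: ofList ((ws ++ [x]).map key) = Set.add S (key x)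
      have hset : PySem.Set.ofList ((ws ++ [x]).map key) = PySem.Set.add S (key x) := by
        rw [PySem.Set.ofList_eq_foldl, List.map_append, List.foldl_append,
            ← PySem.Set.ofList_eq_foldl]
        rfl
      rw [hset]
      -- filters of ws ++ [x]
      have hfil : ∀ n : Int, (ws ++ [x]).filter (fun y => key y == n)
          = ws.filter (fun y => key y == n) ++ (if n = key x then [x] else []) := by
        intro n
        rw [List.filter_append]
        by_cases h : n = key x
        · simp [List.filter, h]
        · have : (key x == n) = false := beq_eq_false_iff_ne.mpr (fun hh => h hh.symm)
          simp [List.filter, this, h]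
      by_cases hmem : key x ∈ ws.map key
      · -- key already present: the set, hence D, is unchanged
        have hcont : PySem.Set.add S (key x) = S := by
          have hc : PySem.Set.contains S (key x) = true :=
            (PySem.Set.contains_iff _ _).mpr (by rw [hS, PySem.Set.mem_ofList]; exact hmem)
          unfold PySem.Set.add; rw [hc]; simp
        rw [hcont, ← hD]
        rw [step_mem key x _ (hg ws) D hDpair ((hmemD _).mpr hmem)]
        refine List.flatMap_congr (fun m hm => ?_)
        rw [hfil m]
        by_cases h : m = key x <;> simp [h]
      · -- new key: D gains key x by one insertBy
        have hcont : PySem.Set.add S (key x) = S ++ [key x] := by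
          have hc : PySem.Set.contains S (key x) = false :=
            Bool.eq_false_iff.mpr (fun hb => hmem (by
              have hmemS := (PySem.Set.contains_iff _ _).mp hb
              rw [hS, PySem.Set.mem_ofList] at hmemS
              exact hmemS))
          unfold PySem.Set.add; rw [hc]; simp
        have hD' : PySem.List.sorted (S ++ [key x]) (fun x : Int => x) true
            = PySem.List.insertBy (fun a b : Int => decide (b < a)) (key x) D := by
          rw [PySem.List.sorted_rev_eq_foldl_insertBy, List.foldl_append,
              ← PySem.List.sorted_rev_eq_foldl_insertBy, ← hD]
          rfl
        rw [hcont, hD']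
        rw [step_new key x _ (hg ws) D hDpair (fun h => hmem ((hmemD _).mp h))]
        refine List.flatMap_congr (fun m hm => ?_)
        rw [hfil m]
        by_cases h : m = key x
        · have hempty : ws.filter (fun y => key y == m) = [] := by
            rw [List.filter_eq_nil_iff]
            intro y hy hkey
            have hk' : key y = m := by simpa using hkey
            exact hmem (by rw [← h, ← hk']; exact List.mem_map_of_mem hy)
          simp [hempty, if_pos h]
        · simp [h]

-- ===== VERDICT (by name: the statement is the Claim_ definition above) =====
theorem lent_spec : Claim_equal_lent := by
  intro r _ _
  unfold Spec_lent lent lent_alt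
  rw [PySem.List.foldl_append_singleton_eq_map, List.nil_append]
  rw [PySem.List.foldl_append_eq_flatMap, List.nil_append]
  exact bucket_sorted (fun l : List String => (l.length : Int)) _
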